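-- pv_equiv track=rewrite | github.com/jack-chaudier/mirage | endogenous_context_theory/src/generators.py | _interleaved_focal_mask
-- ===== SOURCE A (Python) =====
-- from typing import List
--
-- def _interleaved_focal_mask(n: int, n_focal: int) -> List[bool]:
--     """Distribute exactly n_focal focal flags approximately evenly over n events."""
--
--     if n_focal < 0:
--         raise ValueError("n_focal must be >= 0")
--     if n_focal > n:
--         raise ValueError("n_focal cannot exceed n")
--     if n_focal == 0:
--         return [False] * n
--     if n_focal == n:
--         return [True] * n
--
--     mask = [False] * n
--     prev_bucket = -1
--     for i in range(n):
--         bucket = (i * n_focal) // n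
--         if bucket != prev_bucket and bucket < n_focal:
--             mask[i] = True
--         prev_bucket = bucket
--     return mask
-- ===== SOURCE B (Python) =====
-- from typing import List
--
-- def _interleaved_focal_mask(n: int, n_focal: int) -> List[bool]:
--     """Distribute exactly n_focal focal flags approximately evenly over n events."""
--     if n_focal < 0:
--         raise ValueError("n_focal must be >= 0")
--     if n_focal > n:
--         raise ValueError("n_focal cannot exceed n")
--
--     out: List[bool] = []
--     prev = 0
--     for j in range(n_focal):
--         pos = (j * n + n_focal - 1) // n_focal  # ceil(j*n/n_focal): first index of bucket j
--         out.extend([False] * (pos - prev))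
--         out.append(True)
--         prev = pos + 1
--     out.extend([False] * (n - prev))
--     return out
-- ===== Notes on version B (the rewrite author's own statement) =====
-- stated objective: alternative
-- what changed: Instead of allocating an all-False mask and scanning all n indices while tracking the previous bucket to detect boundaries, B builds the output by concatenation: for each of the n_focal flags it appends a run of False gaps followed by True at the closed-form position ceil(j*n/n_focal), then pads the tail; the n_focal==0 and n_focal==n special cases of A disappear.
import Mathlib
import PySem

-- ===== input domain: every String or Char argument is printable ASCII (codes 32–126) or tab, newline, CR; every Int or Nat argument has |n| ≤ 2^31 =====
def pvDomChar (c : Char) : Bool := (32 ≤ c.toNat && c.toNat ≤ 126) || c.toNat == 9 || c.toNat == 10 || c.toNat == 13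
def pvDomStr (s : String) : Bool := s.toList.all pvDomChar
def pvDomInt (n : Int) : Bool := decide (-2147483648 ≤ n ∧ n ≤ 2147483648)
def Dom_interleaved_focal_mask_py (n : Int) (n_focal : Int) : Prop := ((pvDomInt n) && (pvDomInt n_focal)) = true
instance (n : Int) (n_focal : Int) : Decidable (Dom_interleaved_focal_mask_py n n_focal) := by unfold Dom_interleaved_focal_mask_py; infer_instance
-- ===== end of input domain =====

-- B builds the mask by CONCATENATION (for each flag j, a run of False then True at
-- the closed-form position ceil(j*n/n_focal), then a False tail) instead of A's
-- allocate-and-mutate scan over all n indices; objective: alternative (same cost).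

-- ===== PORT A =====
def interleaved_focal_mask_py (n : Int) (n_focal : Int) : List Bool :=
  if n_focal < 0 then []        -- raise ValueError (excluded by Pre_)
  else if n_focal > n then []   -- raise ValueError (excluded by Pre_)
  else if n_focal = 0 then List.replicate n.toNat false
  else if n_focal = n then List.replicate n.toNat true
  else
    ((PySem.List.pyRange 0 n 1).foldl (fun (st : List Bool × Int) i =>
        let bucket := PySem.Int.floordiv (i * n_focal) n
        ((if bucket ≠ st.2 ∧ bucket < n_focal then PySem.List.pySetD st.1 i true else st.1),
         bucket))
      (List.replicate n.toNat false, -1)).1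

-- ===== PORT B =====
def interleaved_focal_mask_py_alt (n : Int) (n_focal : Int) : List Bool :=
  if n_focal < 0 then []        -- raise ValueError (excluded by Pre_)
  else if n_focal > n then []   -- raise ValueError (excluded by Pre_)
  else
    let st := (PySem.List.pyRange 0 n_focal 1).foldl
      (fun (st : List Bool × Int) j =>
        let pos := PySem.Int.floordiv (j * n + n_focal - 1) n_focal
        (st.1 ++ List.replicate (pos - st.2).toNat false ++ [true], pos + 1))
      ([], 0)
    st.1 ++ List.replicate (n - st.2).toNat false

-- ===== PRECONDITION & SPEC =====
-- Exactly the inputs on which A returns normally: A raises ValueError when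
-- n_focal < 0 or n_focal > n.
def Pre_interleaved_focal_mask_py (n : Int) (n_focal : Int) : Prop :=
  0 ≤ n_focal ∧ n_focal ≤ n
instance (n : Int) (n_focal : Int) : Decidable (Pre_interleaved_focal_mask_py n n_focal) := by
  unfold Pre_interleaved_focal_mask_py; infer_instance

def pvWitness_interleaved_focal_mask_py : Int × Int := (5, 2)

def Spec_interleaved_focal_mask_py (n : Int) (n_focal : Int) (out : List Bool) : Prop :=
  out = interleaved_focal_mask_py_alt n n_focal
instance (n : Int) (n_focal : Int) (out : List Bool) : Decidable (Spec_interleaved_focal_mask_py n n_focal out) := by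
  unfold Spec_interleaved_focal_mask_py; infer_instance

-- ===== CLAIM (what is proved, stated in full; the proofs are below) =====
def Claim_equal_interleaved_focal_mask_py : Prop :=
  ∀ (n : Int) (n_focal : Int), Dom_interleaved_focal_mask_py n n_focal →
    Pre_interleaved_focal_mask_py n n_focal →
    Spec_interleaved_focal_mask_py n n_focal (interleaved_focal_mask_py n n_focal)

-- ===== LEMMAS AND PROOFS =====

-- bucket of index i (A's running value), and B's closed-form position of flag j
def pvBkt (n f i : Int) : Int := (i * f) / n
def pvCeil (n f j : Int) : Int := (j * n + f - 1) / f

-- the mask after A has processed indices 0..m-1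
def pvMaskA (n f : Int) (m : Nat) : List Bool :=
  (List.range n.toNat).map (fun (k : Nat) =>
    decide ((k : Int) < m ∧ pvBkt n f k ≠ pvBkt n f ((k : Int) - 1) ∧ pvBkt n f k < f))

-- the first m entries of the mask whose True positions are pvCeil of j = 0..t-1
def pvMaskB (n f : Int) (t : Nat) (m : Nat) : List Bool :=
  (List.range m).map (fun (k : Nat) =>
    decide (∃ j : Nat, j < t ∧ pvCeil n f (j : Int) = (k : Int)))

-- B's running value of prev after t iterations
def pvPrev (n f : Int) : Nat → Int
  | 0 => 0
  | (t+1) => pvCeil n f (t : Int) + 1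

theorem pvPrev_zero (n f : Int) : pvPrev n f 0 = 0 := rfl
theorem pvPrev_succ (n f : Int) (t : Nat) : pvPrev n f (t+1) = pvCeil n f (t : Int) + 1 := rfl

-- -f/n = -1 when 0 < f ≤ n (A's prev_bucket = -1 before the loop is pvBkt at -1)
theorem pv_bkt_neg_one (n f : Int) (h0 : 0 < f) (hfn : f < n) :
    pvBkt n f (-1) = -1 := by
  unfold pvBkt
  have hn : (0:Int) < n := by omega
  have h1 : (-1 * f) / n < 0 := by
    rw [Int.ediv_lt_iff_lt_mul hn]; nlinarith
  have h2 : (-1:Int) ≤ -1 * f / n := by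
    rw [Int.le_ediv_iff_mul_le hn]; nlinarith
  omega

-- B's position is always a valid index (here with f ≤ n)
theorem pv_ceil_range (n f j : Int) (h0 : 0 < f) (hfn : f ≤ n) (hj0 : 0 ≤ j) (hjf : j < f) :
    0 ≤ pvCeil n f j ∧ pvCeil n f j < n := by
  unfold pvCeil
  have hn : (0:Int) < n := by omega
  constructor
  · exact Int.ediv_nonneg (by nlinarith) (by omega)
  · rw [Int.ediv_lt_iff_lt_mul h0]
    nlinarith

theorem pv_ceil_zero (n f : Int) (h0 : 0 < f) : pvCeil n f 0 = 0 := by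
  unfold pvCeil
  rw [zero_mul, zero_add]
  exact Int.ediv_eq_zero_of_lt (by omega) (by omega)

-- pvCeil is strictly increasing in j (needs f ≤ n)
theorem pv_ceil_strict (n f : Int) (h0 : 0 < f) (hfn : f ≤ n) (j k : Int)
    (hjk : j < k) : pvCeil n f j < pvCeil n f k := by
  unfold pvCeil
  have h1 : (j * n + f - 1 + 1 * f) / f ≤ (k * n + f - 1) / f := by
    apply Int.ediv_le_ediv h0
    nlinarith
  rw [Int.add_mul_ediv_right _ _ (by omega : f ≠ 0)] at h1
  omega

theorem pv_pointwise (n f : Int) (h0 : 0 < f) (hfn : f < n) (i : Int)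
    (hi0 : 0 ≤ i) (_hin : i < n) :
    (pvBkt n f i ≠ pvBkt n f (i - 1) ∧ pvBkt n f i < f) ↔
      (∃ j : Nat, j < f.toNat ∧ pvCeil n f (j : Int) = i) := by
  have hn : (0:Int) < n := by omega
  unfold pvBkt pvCeil
  constructor
  · rintro ⟨hne, hlt⟩
    set b := i * f / n with hb
    set p := (i - 1) * f / n with hp
    have hb0 : 0 ≤ b := Int.ediv_nonneg (by nlinarith) (by omega)
    have hpb : p ≤ b := Int.ediv_le_ediv hn (by nlinarith)
    have hplt : p < b := lt_of_le_of_ne hpb (fun h => hne h.symm)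
    have h1 : b * n ≤ i * f := (Int.le_ediv_iff_mul_le hn).mp (le_of_eq hb)
    have h2 : (i - 1) * f < b * n := by
      have := (Int.ediv_lt_iff_lt_mul hn).mp (show (i - 1) * f / n < b from hplt)
      linarith
    refine ⟨b.toNat, by omega, ?_⟩
    rw [Int.toNat_of_nonneg hb0]
    have hle : (b * n + f - 1) / f ≤ i := by
      have : (b * n + f - 1) / f < i + 1 := by
        rw [Int.ediv_lt_iff_lt_mul h0]; nlinarith
      omega
    have hge : i ≤ (b * n + f - 1) / f := by
      rw [Int.le_ediv_iff_mul_le h0]; nlinarith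
    omega
  · rintro ⟨j, hjf, hcj⟩
    set J := (j : Int) with hJ
    have hJ0 : (0:Int) ≤ J := by positivity
    have hJf : J < f := by omega
    have h1 : i * f ≤ J * n + f - 1 := by
      have := (Int.le_ediv_iff_mul_le h0).mp (le_of_eq hcj.symm)
      linarith
    have h2 : J * n ≤ i * f := by
      have : (J * n + f - 1) / f < i + 1 := by omega
      rw [Int.ediv_lt_iff_lt_mul h0] at this
      nlinarith
    have hbJ : i * f / n = J := by
      have hge : J ≤ i * f / n := by rw [Int.le_ediv_iff_mul_le hn]; linarith
      have hlt : i * f / n < J + 1 := by rw [Int.ediv_lt_iff_lt_mul hn]; nlinarith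
      omega
    have hpJ : (i - 1) * f / n < J := by
      rw [Int.ediv_lt_iff_lt_mul hn]; nlinarith
    refine ⟨by omega, by omega⟩

theorem pv_foldA (n f : Int) (h0 : 0 < f) (hfn : f < n) :
    ∀ m : Nat, (m : Int) ≤ n →
      ((PySem.List.pyRange 0 (m : Int) 1).foldl (fun (st : List Bool × Int) i =>
          let bucket := PySem.Int.floordiv (i * f) n
          ((if bucket ≠ st.2 ∧ bucket < f then PySem.List.pySetD st.1 i true else st.1),
           bucket))
        (List.replicate n.toNat false, -1))
      = (pvMaskA n f m, pvBkt n f ((m : Int) - 1)) := by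
  have hn : (0:Int) < n := by omega
  intro m
  induction m with
  | zero =>
    intro _
    rw [PySem.List.pyRange_one_eq_nil (by omega)]
    simp only [List.foldl_nil, Prod.mk.injEq]
    constructor
    · unfold pvMaskA
      apply List.ext_getElem (by simp)
      intro k h1 h2
      symm
      simp only [List.getElem_map, List.getElem_range, List.getElem_replicate,
        decide_eq_false_iff_not]
      rintro ⟨hk, -⟩
      omega
    · rw [show ((0:Nat):Int) - 1 = -1 by omega, pv_bkt_neg_one n f h0 hfn]
  | succ m ih =>
    intro hm1
    have hm : (m : Int) ≤ n := by push_cast at hm1 ⊢; omega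
    rw [show (((m+1:Nat)):Int) = (m:Int) + 1 by push_cast; ring,
        PySem.List.pyRange_one_succ_right (a := 0) (by positivity),
        List.foldl_append, ih hm]
    simp only [List.foldl_cons, List.foldl_nil, Prod.mk.injEq]
    rw [PySem.Int.floordiv_eq_ediv_of_pos hn]
    have hbm : ((m:Int) * f) / n = pvBkt n f m := rfl
    rw [hbm]
    refine ⟨?_, ?_⟩
    · -- mask component
      by_cases hc : pvBkt n f (m:Int) ≠ pvBkt n f ((m:Int) - 1) ∧ pvBkt n f (m:Int) < f
      · rw [if_pos hc]
        simp only [PySem.List.pySetD_natCast]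
        unfold pvMaskA
        apply List.ext_getElem (by simp)
        intro k h1 h2
        simp only [List.length_set, List.length_map, List.length_range] at h1 h2
        rw [List.getElem_set]
        simp only [List.getElem_map, List.getElem_range]
        by_cases hkm : k = m
        · subst hkm
          simp only [if_true]
          symm
          rw [decide_eq_true_iff]
          exact ⟨by push_cast; omega, hc⟩
        · rw [if_neg (fun h => hkm h.symm)]
          apply decide_eq_decide.mpr
          constructor
          · rintro ⟨hk, hC⟩; exact ⟨by push_cast at hk ⊢; omega, hC⟩
          · rintro ⟨hk, hC⟩; exact ⟨by push_cast at hk ⊢; omega, hC⟩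
      · rw [if_neg hc]
        unfold pvMaskA
        apply List.ext_getElem (by simp)
        intro k h1 h2
        simp only [List.getElem_map, List.getElem_range]
        apply decide_eq_decide.mpr
        constructor
        · rintro ⟨hk, hC⟩; exact ⟨by push_cast at hk ⊢; omega, hC⟩
        · rintro ⟨hk, hC⟩
          have hkm : k ≠ m := by rintro rfl; exact hc hC
          exact ⟨by push_cast at hk ⊢; omega, hC⟩
    · -- prev_bucket component
      congr 1
      ring

-- the predicates of pvMaskB for t and t' agree below m → the masks agree
theorem pv_maskB_congr (n f : Int) (t t' m : Nat)
    (h : ∀ k : Nat, k < m →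
      ((∃ j : Nat, j < t ∧ pvCeil n f (j : Int) = (k : Int)) ↔
       (∃ j : Nat, j < t' ∧ pvCeil n f (j : Int) = (k : Int)))) :
    pvMaskB n f t m = pvMaskB n f t' m := by
  unfold pvMaskB
  apply List.map_congr_left
  intro k hk
  rw [List.mem_range] at hk
  exact decide_eq_decide.mpr (h k hk)

-- extend a mask with a run of False when no position lies in [a, b)
theorem pv_maskB_pad (n f : Int) (t a b : Nat) (hab : a ≤ b)
    (h : ∀ j : Nat, j < t →
      pvCeil n f (j : Int) < (a : Int) ∨ (b : Int) ≤ pvCeil n f (j : Int)) :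
    pvMaskB n f t b = pvMaskB n f t a ++ List.replicate (b - a) false := by
  unfold pvMaskB
  rw [show b = a + (b - a) by omega, List.range_add, List.map_append]
  congr 1
  apply List.eq_replicate_iff.mpr
  refine ⟨by simp, ?_⟩
  intro x hx
  simp only [List.mem_map, List.mem_range] at hx
  obtain ⟨d, hd, hx⟩ := hx
  subst hx
  simp only [decide_eq_false_iff_not]
  rintro ⟨j, hj, hcj⟩
  rcases h j hj with h1 | h1 <;> omega

-- append the True at position m
theorem pv_maskB_true (n f : Int) (t m : Nat) (ht : ∃ j : Nat, j < t ∧ pvCeil n f (j:Int) = (m:Int)) :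
    pvMaskB n f t (m + 1) = pvMaskB n f t m ++ [true] := by
  unfold pvMaskB
  rw [List.range_succ, List.map_append]
  congr 1
  simp only [List.map_cons, List.map_nil, List.cons.injEq, and_true]
  rw [decide_eq_true_iff]
  exact ht

-- monotone chain: positions of j < t are below pvPrev t
theorem pv_prev_gt (n f : Int) (h0 : 0 < f) (hfn : f ≤ n) (t : Nat) :
    ∀ j : Nat, j < t → pvCeil n f (j : Int) < pvPrev n f t := by
  intro j hj
  cases t with
  | zero => omega
  | succ t =>
    rw [pvPrev_succ]
    rcases Nat.lt_succ_iff_lt_or_eq.mp hj with h | h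
    · have := pv_ceil_strict n f h0 hfn (j : Int) (t : Int) (by exact_mod_cast h)
      omega
    · subst h; omega

theorem pv_prev_nonneg (n f : Int) (h0 : 0 < f) (hfn : f ≤ n) (t : Nat) (ht : (t:Int) ≤ f) :
    0 ≤ pvPrev n f t := by
  cases t with
  | zero => rw [pvPrev_zero]
  | succ t =>
    rw [pvPrev_succ]
    have := pv_ceil_range n f (t:Int) h0 hfn (by positivity) (by push_cast at ht ⊢; omega)
    omega

-- B's fold invariant
theorem pv_foldB (n f : Int) (h0 : 0 < f) (hfn : f ≤ n) :
    ∀ t : Nat, (t : Int) ≤ f →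
      ((PySem.List.pyRange 0 (t : Int) 1).foldl (fun (st : List Bool × Int) j =>
          let pos := PySem.Int.floordiv (j * n + f - 1) f
          (st.1 ++ List.replicate (pos - st.2).toNat false ++ [true], pos + 1))
        ([], 0))
      = (pvMaskB n f t (pvPrev n f t).toNat, pvPrev n f t) := by
  intro t
  induction t with
  | zero =>
    intro _
    rw [PySem.List.pyRange_one_eq_nil (by omega)]
    simp only [List.foldl_nil]
    unfold pvPrev pvMaskB
    simp
  | succ t ih =>
    intro ht1
    have ht : (t : Int) ≤ f := by push_cast at ht1 ⊢; omega
    rw [show (((t+1:Nat)):Int) = (t:Int) + 1 by push_cast; ring,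
        PySem.List.pyRange_one_succ_right (a := 0) (by positivity),
        List.foldl_append, ih ht]
    simp only [List.foldl_cons, List.foldl_nil]
    rw [PySem.Int.floordiv_eq_ediv_of_pos h0]
    have hct : ((t:Int) * n + f - 1) / f = pvCeil n f t := rfl
    rw [hct]
    have htf : (t:Int) < f := by push_cast at ht1 ⊢; omega
    have hc := pv_ceil_range n f (t:Int) h0 hfn (by positivity) htf
    have hprev0 : 0 ≤ pvPrev n f t := pv_prev_nonneg n f h0 hfn t ht
    have hprevle : pvPrev n f t ≤ pvCeil n f (t:Int) := by
      cases t with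
      | zero =>
        rw [pvPrev_zero, show ((0:Nat):Int) = 0 by norm_num, pv_ceil_zero n f h0]
      | succ s =>
        rw [pvPrev_succ]
        have := pv_ceil_strict n f h0 hfn (s : Int) ((s:Int)+1) (by omega)
        rw [show ((s:Int)+1) = (((s+1:Nat)):Int) by push_cast; ring] at this
        omega
    set P : Int := pvPrev n f t with hP
    set C : Int := pvCeil n f (t:Int) with hC
    have hPC : P.toNat ≤ C.toNat := by omega
    have hgap : (C - P).toNat = C.toNat - P.toNat := by omega
    have hcongr : pvMaskB n f t P.toNat = pvMaskB n f (t+1) P.toNat := by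
      apply pv_maskB_congr
      intro k hk
      constructor
      · rintro ⟨j, hj, hcj⟩; exact ⟨j, by omega, hcj⟩
      · rintro ⟨j, hj, hcj⟩
        rcases Nat.lt_succ_iff_lt_or_eq.mp hj with h | h
        · exact ⟨j, h, hcj⟩
        · exfalso
          subst h
          have hCk : C = (k : Int) := hC.trans hcj
          omega
    have hpad : pvMaskB n f (t+1) C.toNat
        = pvMaskB n f (t+1) P.toNat ++ List.replicate (C.toNat - P.toNat) false := by
      apply pv_maskB_pad n f (t+1) P.toNat C.toNat hPC
      intro j hj
      rcases Nat.lt_succ_iff_lt_or_eq.mp hj with h | h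
      · left
        have := pv_prev_gt n f h0 hfn t j h
        rw [Int.toNat_of_nonneg hprev0]; omega
      · right
        subst h
        omega
    have htrue : pvMaskB n f (t+1) (C.toNat + 1) = pvMaskB n f (t+1) C.toNat ++ [true] :=
      pv_maskB_true n f (t+1) C.toNat ⟨t, by omega, by omega⟩
    refine Prod.ext ?_ rfl
    show pvMaskB n f t P.toNat ++ List.replicate (C - P).toNat false ++ [true]
        = pvMaskB n f (t+1) (pvPrev n f (t+1)).toNat
    rw [pvPrev_succ, show (pvCeil n f (t:Int) + 1).toNat = C.toNat + 1 by omega,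
        htrue, hpad, hcongr, hgap]

-- B's full result for 0 < f ≤ n
theorem pv_B_eq (n f : Int) (h0 : 0 < f) (hfn : f ≤ n) :
    interleaved_focal_mask_py_alt n f = pvMaskB n f f.toNat n.toNat := by
  unfold interleaved_focal_mask_py_alt
  rw [if_neg (by omega), if_neg (by omega)]
  have hB := pv_foldB n f h0 hfn f.toNat (by omega)
  rw [Int.toNat_of_nonneg (by omega : (0:Int) ≤ f)] at hB
  simp only [hB]
  have hprev0 : 0 ≤ pvPrev n f f.toNat := pv_prev_nonneg n f h0 hfn f.toNat (by omega)
  have hprevn : pvPrev n f f.toNat ≤ n := by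
    cases hft : f.toNat with
    | zero => rw [pvPrev_zero]; omega
    | succ s =>
      rw [pvPrev_succ]
      have hs : (s : Int) < f := by omega
      have := pv_ceil_range n f (s:Int) h0 hfn (by positivity) hs
      omega
  rw [pv_maskB_pad n f f.toNat (pvPrev n f f.toNat).toNat n.toNat (by omega) ?_]
  · rw [show (n - pvPrev n f f.toNat).toNat = n.toNat - (pvPrev n f f.toNat).toNat by omega]
  · intro j hj
    left
    have := pv_prev_gt n f h0 hfn f.toNat j hj
    rw [Int.toNat_of_nonneg hprev0]
    omega

-- ===== VERDICT (by name: the statement is the Claim_ definition above) =====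
theorem interleaved_focal_mask_py_spec : Claim_equal_interleaved_focal_mask_py := by
  intro n f _ hpre
  obtain ⟨h0, hfn⟩ := hpre
  unfold Spec_interleaved_focal_mask_py
  by_cases hf0 : f = 0
  · -- both all-False
    subst hf0
    unfold interleaved_focal_mask_py interleaved_focal_mask_py_alt
    rw [if_neg (by omega), if_neg (by omega), if_pos rfl,
        if_neg (by omega), if_neg (by omega)]
    rw [PySem.List.pyRange_one_eq_nil (by omega)]
    simp
  by_cases hfe : f = n
  · -- both all-True
    subst hfe
    rw [pv_B_eq f f (by omega) le_rfl]
    unfold interleaved_focal_mask_py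
    rw [if_neg (by omega), if_neg (by omega), if_neg hf0, if_pos rfl]
    unfold pvMaskB
    apply List.ext_getElem (by simp)
    intro k h1 h2
    simp only [List.length_replicate] at h1
    simp only [List.getElem_replicate, List.getElem_map, List.getElem_range]
    symm
    rw [decide_eq_true_iff]
    refine ⟨k, h1, ?_⟩
    unfold pvCeil
    have hfp : (0:Int) < f := by omega
    rw [show (k:Int) * f + f - 1 = (f - 1) + (k:Int) * f by ring,
        Int.add_mul_ediv_right _ _ (by omega : f ≠ 0),
        Int.ediv_eq_zero_of_lt (by omega) (by omega)]
    omega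
  · -- 0 < f < n
    have hf0' : (0:Int) < f := by omega
    have hfn' : f < n := by omega
    rw [pv_B_eq n f hf0' (by omega)]
    unfold interleaved_focal_mask_py
    rw [if_neg (by omega), if_neg (by omega), if_neg hf0, if_neg hfe]
    have hA := pv_foldA n f hf0' hfn' n.toNat (by omega)
    rw [Int.toNat_of_nonneg (show (0:Int) ≤ n by omega)] at hA
    rw [hA]
    unfold pvMaskA pvMaskB
    apply List.map_congr_left
    intro k hk
    rw [List.mem_range] at hk
    apply decide_eq_decide.mpr
    have hki : (0:Int) ≤ (k:Int) ∧ (k:Int) < n := ⟨by positivity, by omega⟩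
    rw [show ((k:Int) < (n.toNat : Int) ∧ pvBkt n f k ≠ pvBkt n f ((k:Int) - 1) ∧ pvBkt n f k < f)
          ↔ (pvBkt n f k ≠ pvBkt n f ((k:Int) - 1) ∧ pvBkt n f k < f) from
        ⟨fun h => h.2, fun h => ⟨by omega, h⟩⟩]
    exact pv_pointwise n f hf0' hfn' k hki.1 hki.2
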